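-- pv_equiv track=rewrite | github.com/tomcuel/Advent_Of_Code | AdventOfCode-2022-Python/day17/day17-1.py | place_the_entry
-- ===== SOURCE A (Python) =====
-- def place_the_entry(map, rocks_type: str) :
--     # maps need to be 10 lines at the moment
--
--     # for each rock :
--     # place the rock
--     # get the height of the rock to know the height of the new_map
--     # created a new map
--     # make the 3 steps bewteen the lower of this rock and the higher of the previous rock placement
--     # copie the 10 last lines of the map in the new map on its 10 last lines
--
--
--     if rocks_type == "-":
--         height_of_the_rock=1
--         map_changed=[[0]*7 for i in range(height_of_the_rock+3)]
--         map_changed[0][2]=2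
--         map_changed[0][3]=2
--         map_changed[0][4]=2
--         map_changed[0][5]=2
--
--     elif rocks_type == "+":
--         height_of_the_rock=3
--         map_changed=[[0]*7 for i in range(height_of_the_rock+3)]
--         map_changed[0][3]=2
--         map_changed[1][2]=2
--         map_changed[1][3]=2
--         map_changed[1][4]=2
--         map_changed[2][3]=2
--
--     elif rocks_type == "j":
--         height_of_the_rock=3
--         map_changed=[[0]*7 for i in range(height_of_the_rock+3)]
--         map_changed[0][4]=2
--         map_changed[1][4]=2
--         map_changed[2][4]=2
--         map_changed[2][3]=2
--         map_changed[2][2]=2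
--
--     elif rocks_type == "|":
--         height_of_the_rock=4
--         map_changed=[[0]*7 for i in range(height_of_the_rock+3)]
--         map_changed[0][2]=2
--         map_changed[1][2]=2
--         map_changed[2][2]=2
--         map_changed[3][2]=2
--
--     elif rocks_type == "@":
--         height_of_the_rock=2
--         map_changed=[[0]*7 for i in range(height_of_the_rock+3)]
--         map_changed[0][2]=2
--         map_changed[0][3]=2
--         map_changed[1][2]=2
--         map_changed[1][3]=2
--
--
--     return map_changed
-- ===== SOURCE B (Python) =====
-- # B renders each rock from an ASCII-art sprite string and appends three blank rows,
-- # instead of allocating a height+3 zero grid and assigning individual cells.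
-- _SPRITES = {
--     "-": "..####.",
--     "+": "...#...\n..###..\n...#...",
--     "j": "....#..\n....#..\n..###..",
--     "|": "..#....\n..#....\n..#....\n..#....",
--     "@": "..##...\n..##...",
-- }
--
-- def place_the_entry(map, rocks_type: str):
--     art = _SPRITES[rocks_type]
--     rows = [[2 * (ch == '#') for ch in line] for line in art.split('\n')]
--     return rows + [[0] * 7 for _ in range(3)]
-- ===== Notes on version B (the rewrite author's own statement) =====
-- stated objective: simpler
-- what changed: B renders each rock from an ASCII-art sprite string (splitting lines and mapping '#' to 2) and appends three blank rows, instead of allocating a height+3 zero grid and mutating individual cells per branch.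
import Mathlib
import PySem

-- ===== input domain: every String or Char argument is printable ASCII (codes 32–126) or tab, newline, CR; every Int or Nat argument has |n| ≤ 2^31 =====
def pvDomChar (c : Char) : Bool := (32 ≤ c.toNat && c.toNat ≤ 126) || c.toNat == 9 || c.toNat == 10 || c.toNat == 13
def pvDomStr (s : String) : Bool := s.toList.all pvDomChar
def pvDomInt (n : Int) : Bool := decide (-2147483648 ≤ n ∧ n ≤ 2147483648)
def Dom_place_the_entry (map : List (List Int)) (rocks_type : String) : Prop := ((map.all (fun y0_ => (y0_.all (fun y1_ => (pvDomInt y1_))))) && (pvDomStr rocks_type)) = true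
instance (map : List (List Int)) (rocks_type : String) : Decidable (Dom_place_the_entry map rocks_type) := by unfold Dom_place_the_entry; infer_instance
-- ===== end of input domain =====

-- B renders each rock from an ASCII-art sprite (split into lines, '#' ↦ 2) plus three blank
-- rows, instead of A's zeroed height+3 grid with per-cell assignments; return value only
-- ('map' is unused). Objective: simpler.

-- ===== PORT A =====
-- map_changed[i][j] = 2 : all indices in A are literal and in range, so List.modify/List.set is exact.
def pvSet2 (g : List (List Int)) (i j : Nat) : List (List Int) :=
  g.modify i (fun row => row.set j 2)

def place_the_entry (map : List (List Int)) (rocks_type : String) : List (List Int) :=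
  if rocks_type = "-" then
    let height_of_the_rock := 1
    let map_changed := List.replicate (height_of_the_rock + 3) (List.replicate 7 (0 : Int))
    let map_changed := pvSet2 map_changed 0 2
    let map_changed := pvSet2 map_changed 0 3
    let map_changed := pvSet2 map_changed 0 4
    let map_changed := pvSet2 map_changed 0 5
    map_changed
  else if rocks_type = "+" then
    let height_of_the_rock := 3
    let map_changed := List.replicate (height_of_the_rock + 3) (List.replicate 7 (0 : Int))
    let map_changed := pvSet2 map_changed 0 3
    let map_changed := pvSet2 map_changed 1 2
    let map_changed := pvSet2 map_changed 1 3
    let map_changed := pvSet2 map_changed 1 4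
    let map_changed := pvSet2 map_changed 2 3
    map_changed
  else if rocks_type = "j" then
    let height_of_the_rock := 3
    let map_changed := List.replicate (height_of_the_rock + 3) (List.replicate 7 (0 : Int))
    let map_changed := pvSet2 map_changed 0 4
    let map_changed := pvSet2 map_changed 1 4
    let map_changed := pvSet2 map_changed 2 4
    let map_changed := pvSet2 map_changed 2 3
    let map_changed := pvSet2 map_changed 2 2
    map_changed
  else if rocks_type = "|" then
    let height_of_the_rock := 4
    let map_changed := List.replicate (height_of_the_rock + 3) (List.replicate 7 (0 : Int))
    let map_changed := pvSet2 map_changed 0 2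
    let map_changed := pvSet2 map_changed 1 2
    let map_changed := pvSet2 map_changed 2 2
    let map_changed := pvSet2 map_changed 3 2
    map_changed
  else if rocks_type = "@" then
    let height_of_the_rock := 2
    let map_changed := List.replicate (height_of_the_rock + 3) (List.replicate 7 (0 : Int))
    let map_changed := pvSet2 map_changed 0 2
    let map_changed := pvSet2 map_changed 0 3
    let map_changed := pvSet2 map_changed 1 2
    let map_changed := pvSet2 map_changed 1 3
    map_changed
  else
    []  -- unreachable under Pre_: Python raises UnboundLocalError here

-- ===== PORT B =====
def pvSprites : List (String × String) :=
  [("-", "..####."),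
   ("+", "...#...\n..###..\n...#..."),
   ("j", "....#..\n....#..\n..###.."),
   ("|", "..#....\n..#....\n..#....\n..#...."),
   ("@", "..##...\n..##...")]

def place_the_entry_alt (map : List (List Int)) (rocks_type : String) : List (List Int) :=
  match (PySem.Dict.ofList pvSprites).get? rocks_type with
  | none => []  -- unreachable under Pre_: Python raises KeyError here
  | some art =>
    let rows := ((PySem.Str.split? art "\n").getD []).map (fun line =>
      line.toList.map (fun ch => 2 * (if ch = '#' then (1 : Int) else 0)))
    rows ++ (List.range 3).map (fun _ => List.replicate 7 (0 : Int))

-- ===== PRECONDITION & SPEC =====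
-- Pre_ excludes unknown rock types, on which A raises UnboundLocalError (and B raises KeyError).
def Pre_place_the_entry (map : List (List Int)) (rocks_type : String) : Prop :=
  rocks_type = "-" ∨ rocks_type = "+" ∨ rocks_type = "j" ∨ rocks_type = "|" ∨ rocks_type = "@"
instance (map : List (List Int)) (rocks_type : String) : Decidable (Pre_place_the_entry map rocks_type) := by unfold Pre_place_the_entry; infer_instance

def pvWitness_place_the_entry : List (List Int) × String := ([], "+")

def Spec_place_the_entry (map : List (List Int)) (rocks_type : String) (out : List (List Int)) : Prop := out = place_the_entry_alt map rocks_type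
instance (map : List (List Int)) (rocks_type : String) (out : List (List Int)) : Decidable (Spec_place_the_entry map rocks_type out) := by unfold Spec_place_the_entry; infer_instance

-- ===== CLAIM =====
def Claim_equal_place_the_entry : Prop := ∀ (map : List (List Int)) (rocks_type : String), Dom_place_the_entry map rocks_type → Pre_place_the_entry map rocks_type → Spec_place_the_entry map rocks_type (place_the_entry map rocks_type)

-- ===== LEMMAS AND PROOFS =====

-- ===== VERDICT =====
theorem place_the_entry_spec : Claim_equal_place_the_entry := by
  intro map rt _ pre
  rcases pre with h | h | h | h | h <;> subst h <;>
    unfold Spec_place_the_entry place_the_entry place_the_entry_alt <;> decide
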